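-- pv_equiv track=rewrite | github.com/vals-ai/med-alignment | main.py | compute_human_majority
-- ===== SOURCE A (Python) =====
-- from collections import Counter
--
-- def compute_human_majority(
--     human_ratings: dict[str, list[str]],
-- ) -> list[str | None]:
--     if not human_ratings:
--         return []
--     human_raters = list(human_ratings.keys())
--     n_items = len(next(iter(human_ratings.values())))
--     majority: list[str | None] = []
--     for idx in range(n_items):
--         labels = [human_ratings[r][idx] for r in human_raters]
--         counts = Counter(labels)
--         if not counts:
--             majority.append(None)
--             continue
--         best, best_count = counts.most_common(1)[0]
--         # check for ties
--         tied = [label for label, count in counts.items() if count == best_count]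
--         if len(tied) > 1:
--             majority.append(None)
--         else:
--             majority.append(best)
--     return majority
-- ===== SOURCE B (Python) =====
-- def compute_human_majority(
--     human_ratings: dict[str, list[str]],
-- ) -> list[str | None]:
--     if not human_ratings:
--         return []
--     raters = list(human_ratings.keys())
--     n_items = len(next(iter(human_ratings.values())))
--     majority: list[str | None] = []
--     for idx in range(n_items):
--         labels = sorted(human_ratings[r][idx] for r in raters)
--         best = None
--         best_len = 0
--         num_best = 0
--         i = 0
--         while i < len(labels):
--             j = i
--             while j < len(labels) and labels[j] == labels[i]:
--                 j += 1
--             run = j - i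
--             if run > best_len:
--                 best, best_len, num_best = labels[i], run, 1
--             elif run == best_len:
--                 num_best += 1
--             i = j
--         majority.append(best if num_best == 1 else None)
--     return majority
-- ===== Notes on version B (the rewrite author's own statement) =====
-- stated objective: alternative
-- what changed: Per item, B replaces A's Counter / most_common(1) / tie-filter with sorting the item's labels and a single scan over the sorted list that counts consecutive equal runs, tracking the longest run and how many distinct labels attain it.
import Mathlib
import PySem

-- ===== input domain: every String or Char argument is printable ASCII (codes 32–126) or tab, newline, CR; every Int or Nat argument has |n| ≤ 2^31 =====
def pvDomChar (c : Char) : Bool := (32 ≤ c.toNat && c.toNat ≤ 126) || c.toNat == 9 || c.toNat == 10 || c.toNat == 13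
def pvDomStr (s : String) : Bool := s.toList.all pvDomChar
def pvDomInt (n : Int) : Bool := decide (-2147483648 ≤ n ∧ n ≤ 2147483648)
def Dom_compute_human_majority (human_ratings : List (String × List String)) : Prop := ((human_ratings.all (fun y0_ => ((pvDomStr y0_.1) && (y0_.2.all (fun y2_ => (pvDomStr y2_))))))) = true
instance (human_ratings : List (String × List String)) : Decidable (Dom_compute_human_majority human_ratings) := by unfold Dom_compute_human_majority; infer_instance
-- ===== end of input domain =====

-- B replaces A's Counter / most_common / tie-filter per item by sorting the item's labels and
-- scanning the sorted list once, counting consecutive equal runs (objective: alternative).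

-- ===== PORT A =====
-- human_ratings[r]: dict lookup = first match in the association list; the .getD [] branch is
-- unreachable because r is drawn from the keys of human_ratings itself.
def pvLookupA (hr : List (String × List String)) (r : String) : List String :=
  ((hr.find? (fun p => p.1 == r)).map Prod.snd).getD []

-- labels = [human_ratings[r][idx] for r in human_raters]; pyGet? none = IndexError on a rater
-- shorter than the first one — excluded by Pre_ (the .getD "" default fires only there).
def pvLabelsA (hr : List (String × List String)) (idx : Nat) : List String :=
  (hr.map Prod.fst).map (fun r => ((PySem.List.pyGet? (pvLookupA hr r) (idx : Int)).getD ""))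

-- one iteration of A's loop body: Counter, most_common(1)[0] (= first item with maximal count),
-- then the tie filter
def pvItemA (labels : List String) : Option String :=
  let counts := PySem.Dict.counter labels
  if counts.items = [] then none
  else
    match PySem.List.max? counts.items (fun p => p.2) with
    | none => none
    | some bp =>
      let tied := counts.items.filter (fun p => p.2 == bp.2)
      if 1 < tied.length then none else some bp.1

def compute_human_majority (human_ratings : List (String × List String)) : List (Option String) :=
  match human_ratings with
  | [] => []
  | p :: rest => (List.range p.2.length).map (fun idx => pvItemA (pvLabelsA (p :: rest) idx))

-- ===== PORT B =====
def pvLookupB (hr : List (String × List String)) (r : String) : List String :=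
  ((hr.find? (fun q => q.1 == r)).map (fun q => q.2)).getD []

def pvLabelsB (hr : List (String × List String)) (idx : Nat) : List String :=
  (hr.map (fun q => q.1)).map (fun r => ((PySem.List.pyGet? (pvLookupB hr r) (idx : Int)).getD ""))

-- Source B's while loops over the sorted labels: the inner 'while labels[j] == labels[i]' is the
-- takeWhile run at the current position, the outer loop restarts at i = j (the dropWhile rest),
-- carrying the same state (best, best_len, num_best).
def pvRunScan : List String → Option String → Nat → Nat → Option String
  | [], best, _, nb => if nb = 1 then best else none
  | x :: rest, best, bl, nb =>
    let run := ((x :: rest).takeWhile (fun y => y == x)).length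
    let tail := (x :: rest).dropWhile (fun y => y == x)
    if bl < run then pvRunScan tail (some x) run 1
    else if run = bl then pvRunScan tail best bl (nb + 1)
    else pvRunScan tail best bl nb
termination_by s _ _ _ => s.length
decreasing_by
  all_goals
    simp only [List.dropWhile_cons, BEq.rfl, if_true]
    exact Nat.lt_succ_of_le (List.length_dropWhile_le _ _)

def pvItemB (labels : List String) : Option String :=
  pvRunScan (PySem.List.sorted labels (fun x => x) false) none 0 0

def compute_human_majority_alt (human_ratings : List (String × List String)) : List (Option String) :=
  match human_ratings with
  | [] => []
  | p :: rest => (List.range p.2.length).map (fun idx => pvItemB (pvLabelsB (p :: rest) idx))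

-- ===== PRECONDITION & SPEC =====
-- Pre_ excludes (a) ragged inputs where some rater has fewer items than the first rater — there
-- Python A (and B) raise IndexError — and (b) duplicate rater keys, on which the association-list
-- representation does not correspond to a Python dict (dict construction keeps the last value,
-- the first-match lookup of the port the first).
def Pre_compute_human_majority (human_ratings : List (String × List String)) : Prop :=
  (human_ratings.map Prod.fst).Nodup ∧
  ∀ q ∈ human_ratings, ((human_ratings.head?.map (fun p => p.2.length)).getD 0) ≤ q.2.length
instance (human_ratings : List (String × List String)) : Decidable (Pre_compute_human_majority human_ratings) := by unfold Pre_compute_human_majority; infer_instance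

def pvWitness_compute_human_majority : (List (String × List String)) :=
  [("a", ["x", "y"]), ("b", ["x", "z"])]

def Spec_compute_human_majority (human_ratings : List (String × List String)) (out : List (Option String)) : Prop := out = compute_human_majority_alt human_ratings
instance (human_ratings : List (String × List String)) (out : List (Option String)) : Decidable (Spec_compute_human_majority human_ratings out) := by unfold Spec_compute_human_majority; infer_instance

-- ===== CLAIM (what is proved, stated in full; the proofs are below) =====
def Claim_equal_compute_human_majority : Prop := ∀ (human_ratings : List (String × List String)), Dom_compute_human_majority human_ratings → Pre_compute_human_majority human_ratings → Spec_compute_human_majority human_ratings (compute_human_majority human_ratings)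

-- ===== LEMMAS AND PROOFS =====

-- maximal count of any label of s (0 for the empty list)
def pvM0 (s : List String) : Nat := (s.map (fun k => s.count k)).foldr max 0

lemma pvFoldrMax_le {l : List Nat} {m : Nat} (h : ∀ a ∈ l, a ≤ m) : l.foldr max 0 ≤ m := by
  induction l with
  | nil => exact Nat.zero_le m
  | cons a t ih =>
    simpa using Nat.max_le.mpr ⟨h a (by simp), ih fun b hb => h b (by simp [hb])⟩

lemma pvLe_foldrMax {l : List Nat} {a : Nat} (h : a ∈ l) : a ≤ l.foldr max 0 := by
  induction l with
  | nil => simp at h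
  | cons b t ih =>
    rcases List.mem_cons.mp h with rfl | hb
    · exact Nat.le_max_left _ _
    · exact le_trans (ih hb) (Nat.le_max_right _ _)


lemma pvM0_ge {s : List String} {k : String} (h : k ∈ s) : s.count k ≤ pvM0 s :=
  pvLe_foldrMax (List.mem_map.mpr ⟨k, h, rfl⟩)

lemma pvM0_le {s : List String} {m : Nat} (h : ∀ k ∈ s, s.count k ≤ m) : pvM0 s ≤ m :=
  pvFoldrMax_le (by
    intro a ha
    rcases List.mem_map.mp ha with ⟨k, hk, rfl⟩
    exact h k hk)

-- the closed form the run scan computes (proved below): M = best count seen overall,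
-- C = number of distinct labels of s achieving it
def pvScanSpec (s : List String) (best : Option String) (bl nb : Nat) : Option String :=
  let M := max bl (pvM0 s)
  let C := (PySem.List.dedup s).countP (fun k => s.count k == M)
  if (if bl = M then nb else 0) + C = 1 then
    (if C = 0 then best else s.find? (fun k => s.count k == M))
  else none

lemma pvFind?_congr {p q : String → Bool} :
    ∀ {l : List String}, (∀ a ∈ l, p a = q a) → l.find? p = l.find? q := by
  intro l
  induction l with
  | nil => intro _; rfl
  | cons a t ih =>
    intro h
    simp only [List.find?_cons, h a (by simp)]
    cases q a with
    | true => rfl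
    | false => exact ih fun b hb => h b (by simp [hb])

lemma pvCountP_eq_one_unique {p : String → Bool} {l : List String} (h : l.countP p = 1)
    {a b : String} (ha : a ∈ l) (hb : b ∈ l) (hpa : p a = true) (hpb : p b = true) : a = b := by
  rw [List.countP_eq_length_filter] at h
  rcases List.length_eq_one_iff.mp h with ⟨z, hz⟩
  have h1 : a ∈ l.filter p := List.mem_filter.mpr ⟨ha, hpa⟩
  have h2 : b ∈ l.filter p := List.mem_filter.mpr ⟨hb, hpb⟩
  rw [hz] at h1 h2
  simp at h1 h2
  rw [h1, h2]

lemma pvNotMemDrop {x : String} : ∀ {s : List String}, s.Pairwise (· ≤ ·) →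
    (∀ y ∈ s, x ≤ y) → x ∉ s.dropWhile (fun y => y == x) := by
  intro s
  induction s with
  | nil => intro _ _; simp
  | cons y t ih =>
    intro hp hx
    rw [List.dropWhile_cons]
    by_cases hyx : (y == x) = true
    · simp only [hyx, if_true]
      exact ih (List.pairwise_cons.mp hp).2 fun z hz => hx z (by simp [hz])
    · simp only [hyx]
      intro hmem
      rcases List.mem_cons.mp hmem with rfl | hxt
      · exact hyx (by simp)
      · have h1 : y ≤ x := (List.pairwise_cons.mp hp).1 x hxt
        have h2 : x ≤ y := hx y (by simp)
        exact hyx (by simp [le_antisymm h1 h2])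

lemma pvFind?_all_eq {p : String → Bool} {x : String} {tk : List String} (hne : tk ≠ [])
    (hall : ∀ y ∈ tk, y = x) : tk.find? p = if p x then some x else none := by
  cases hpx : p x with
  | true =>
    cases tk with
    | nil => exact absurd rfl hne
    | cons y t =>
      have hy : y = x := hall y (by simp)
      subst hy
      simp [hpx]
  | false =>
    have h0 : tk.find? p = none :=
      List.find?_eq_none.mpr fun a ha => by rw [hall a ha, hpx]; simp
    simp [h0]

lemma pvRunScan_eq_aux : ∀ (n : Nat) (s : List String), s.length ≤ n →
    s.Pairwise (· ≤ ·) → ∀ (best : Option String) (bl nb : Nat), (bl = 0 ↔ nb = 0) →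
    pvRunScan s best bl nb = pvScanSpec s best bl nb := by
  intro n
  induction n with
  | zero =>
    intro s hlen _ best bl nb hbn
    have : s = [] := List.eq_nil_of_length_eq_zero (Nat.le_zero.mp hlen)
    subst this
    have hofnil : PySem.List.dedup ([] : List String) = [] := rfl
    simp only [pvRunScan, pvScanSpec, pvM0, List.map_nil, List.foldr_nil, Nat.max_zero, hofnil,
      List.countP_nil]
    split_ifs <;> first | rfl | omega
  | succ n ih =>
    intro s hlen hs best bl nb hbn
    cases s with
    | nil =>
      have hofnil : PySem.List.dedup ([] : List String) = [] := rfl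
      simp only [pvRunScan, pvScanSpec, pvM0, List.map_nil, List.foldr_nil, Nat.max_zero, hofnil,
        List.countP_nil]
      split_ifs <;> first | rfl | omega
    | cons x rest =>
      -- decomposition of the sorted list into the head run and the rest
      have hps : ((x : String) == x) = true := by simp
      set tk := (x :: rest).takeWhile (fun y => y == x) with htk
      set tl := (x :: rest).dropWhile (fun y => y == x) with htl
      set r := tk.length with hrdef
      have hsplit : tk ++ tl = x :: rest := List.takeWhile_append_dropWhile
      have htk_all : ∀ y ∈ tk, y = x := by
        intro y hy
        rw [htk] at hy
        have h2 := @List.mem_takeWhile_imp String (fun y => y == x) (x :: rest) y hy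
        exact eq_of_beq h2
      have hxle : ∀ y ∈ x :: rest, x ≤ y := by
        intro y hy
        rcases List.mem_cons.mp hy with rfl | hyt
        · exact le_refl y
        · exact (List.pairwise_cons.mp hs).1 y hyt
      have hx_tl : x ∉ tl := pvNotMemDrop hs hxle
      have htl_ne : ∀ k ∈ tl, k ≠ x := fun k hk heq => hx_tl (heq ▸ hk)
      have hr1 : 1 ≤ r := by
        rw [hrdef, htk, List.takeWhile_cons]
        simp
      have hcx : (x :: rest).count x = r := by
        have h3 : (tk ++ tl).count x = r := by
          rw [List.count_append, List.count_eq_zero.mpr hx_tl,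
            List.count_eq_length.mpr fun b hb => (htk_all b hb).symm]
          omega
        rwa [hsplit] at h3
      have hck : ∀ k ∈ tl, (x :: rest).count k = tl.count k := by
        intro k hk
        have hknotk : k ∉ tk := fun hmem => htl_ne k hk (htk_all k hmem)
        have h3 : (tk ++ tl).count k = tl.count k := by
          rw [List.count_append, List.count_eq_zero.mpr hknotk, Nat.zero_add]
        rwa [hsplit] at h3
      have htlp : tl.Pairwise (· ≤ ·) := List.Pairwise.sublist (List.dropWhile_sublist _) hs
      have hmem_tl_s : ∀ k ∈ tl, k ∈ x :: rest := fun k hk => (List.dropWhile_sublist _).mem hk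
      have hlen' : tl.length ≤ n := by
        have h3 : (x :: rest).length = r + tl.length := by
          rw [← hsplit, List.length_append, hrdef]
        omega
      -- maximal count decomposes through the run
      have hM8 : pvM0 (x :: rest) = max r (pvM0 tl) := by
        apply le_antisymm
        · apply pvM0_le
          intro k hk
          rcases List.mem_append.mp (by rw [hsplit]; exact hk) with hk1 | hk2
          · rw [htk_all k hk1, hcx]; exact Nat.le_max_left _ _
          · rw [hck k hk2]; exact le_trans (pvM0_ge hk2) (Nat.le_max_right _ _)
        · apply Nat.max_le.mpr
          constructor
          · rw [← hcx]; exact pvM0_ge List.mem_cons_self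
          · apply pvM0_le
            intro k hk
            rw [← hck k hk]
            exact pvM0_ge (hmem_tl_s k hk)
      -- the distinct labels of x :: rest are x plus the distinct labels of tl
      have hdd : (PySem.List.dedup (x :: rest)).Perm (x :: PySem.List.dedup tl) := by
        rw [PySem.List.dedup_eq_ofList, PySem.List.dedup_eq_ofList]
        apply (List.perm_ext_iff_of_nodup (PySem.Set.nodup_ofList (x :: rest))
          (List.nodup_cons.mpr ⟨fun h => hx_tl ((PySem.Set.mem_ofList tl x).mp h),
            PySem.Set.nodup_ofList tl⟩)).mpr
        intro a
        constructor
        · intro h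
          have ha : a ∈ x :: rest := (PySem.Set.mem_ofList (x :: rest) a).mp h
          rcases List.mem_append.mp (by rw [hsplit]; exact ha) with h1 | h2
          · exact (htk_all a h1) ▸ List.mem_cons_self
          · exact List.mem_cons_of_mem x ((PySem.Set.mem_ofList tl a).mpr h2)
        · intro h
          apply (PySem.Set.mem_ofList (x :: rest) a).mpr
          rcases List.mem_cons.mp h with rfl | h2
          · exact List.mem_cons_self
          · exact hmem_tl_s a ((PySem.Set.mem_ofList tl a).mp h2)
      have hCs : ∀ M : Nat, (PySem.List.dedup (x :: rest)).countP (fun k => (x :: rest).count k == M) =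
          (if r = M then 1 else 0) + (PySem.List.dedup tl).countP (fun k => tl.count k == M) := by
        intro M
        rw [List.Perm.countP_eq _ hdd, List.countP_cons,
          List.countP_congr (fun k hk => by
            rw [hck k ((PySem.List.mem_dedup tl k).mp hk)]),
          hcx]
        simp only [beq_iff_eq]
        omega
      have hFs : ∀ M : Nat, (x :: rest).find? (fun k => (x :: rest).count k == M) =
          if r = M then some x else tl.find? (fun k => tl.count k == M) := by
        intro M
        have h0 := List.find?_append (p := fun k => (x :: rest).count k == M) (xs := tk) (ys := tl)
        rw [hsplit] at h0
        have htkne : tk ≠ [] := by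
          intro h; rw [h] at hrdef; simp [hrdef] at hr1
        rw [h0, pvFind?_all_eq htkne htk_all,
          pvFind?_congr (fun k hk => by rw [hck k hk]), hcx]
        by_cases hrm : r = M <;> simp [hrm]
      -- one unfolding of the loop
      rw [pvRunScan]
      simp only [← htk, ← htl, ← hrdef]
      by_cases h1 : bl < r
      · rw [if_pos h1, ih tl hlen' htlp (some x) r 1 (by omega)]
        simp only [pvScanSpec, hM8, hCs, hFs]
        have hMeq : max bl (max r (pvM0 tl)) = max r (pvM0 tl) :=
          Nat.max_eq_right (le_trans (Nat.le_of_lt h1) (Nat.le_max_left _ _))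
        rw [hMeq]
        have hblne : ¬ (bl = max r (pvM0 tl)) := by
          have := Nat.le_max_left r (pvM0 tl); omega
        rw [if_neg hblne]
        by_cases hrm : r = max r (pvM0 tl)
        · simp only [if_pos hrm]
          split_ifs <;> first | rfl | omega
        · simp only [if_neg hrm]
          split_ifs <;> first | rfl | omega
      · rw [if_neg h1]
        by_cases h2 : r = bl
        · rw [if_pos h2, ih tl hlen' htlp best bl (nb + 1) (by omega)]
          simp only [pvScanSpec, hM8, hCs, hFs, ← h2]
          have hMeq : max r (max r (pvM0 tl)) = max r (pvM0 tl) := by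
            rw [← Nat.max_assoc, Nat.max_self]
          rw [hMeq]
          by_cases hrm : r = max r (pvM0 tl)
          · simp only [if_pos hrm]
            have hnb : nb ≠ 0 := fun h => by
              have := hbn.mpr h
              omega
            split_ifs <;> first | rfl | omega
          · simp only [if_neg hrm]
            split_ifs <;> first | rfl | omega
        · rw [if_neg h2, ih tl hlen' htlp best bl nb hbn]
          simp only [pvScanSpec, hM8, hCs, hFs]
          have hrbl : r < bl := by omega
          have hMeq : max bl (max r (pvM0 tl)) = max bl (pvM0 tl) := by
            rw [← Nat.max_assoc, Nat.max_eq_left (Nat.le_of_lt hrbl)]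
          rw [hMeq]
          have hrm : ¬ (r = max bl (pvM0 tl)) := by
            have := Nat.le_max_left bl (pvM0 tl); omega
          simp only [if_neg hrm, Nat.zero_add]

lemma pvItemB_char (l : List String) :
    pvItemB l =
      (if (PySem.List.dedup l).countP (fun k => l.count k == pvM0 l) = 1 then
        (PySem.List.sorted l (fun x => x) false).find? (fun k => l.count k == pvM0 l)
      else none) := by
  have hperm : (PySem.List.sorted l (fun x => x) false).Perm l :=
    PySem.List.sorted_perm l (fun x => x) false
  have hcnt : ∀ k, (PySem.List.sorted l (fun x => x) false).count k = l.count k :=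
    hperm.count_eq
  have hM : pvM0 (PySem.List.sorted l (fun x => x) false) = pvM0 l := by
    apply le_antisymm
    · exact pvM0_le fun k hk => (hcnt k) ▸ pvM0_ge (hperm.mem_iff.mp hk)
    · exact pvM0_le fun k hk => (hcnt k).symm ▸ pvM0_ge (hperm.mem_iff.mpr hk)
  have hdedperm : (PySem.List.dedup (PySem.List.sorted l (fun x => x) false)).Perm
      (PySem.List.dedup l) := by
    apply (List.perm_ext_iff_of_nodup (PySem.List.nodup_dedup _) (PySem.List.nodup_dedup _)).mpr
    intro a
    rw [PySem.List.mem_dedup, PySem.List.mem_dedup]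
    exact hperm.mem_iff
  have hpair : (PySem.List.sorted l (fun x => x) false).Pairwise (· ≤ ·) := by
    simpa using PySem.List.sorted_pairwise l (fun x => x)
  rw [pvItemB, pvRunScan_eq_aux (PySem.List.sorted l (fun x => x) false).length _
    (le_refl _) hpair none 0 0 (by simp)]
  simp only [pvScanSpec, Nat.zero_max, hM, hcnt, List.Perm.countP_eq _ hdedperm]
  have h0 : (if (0 : Nat) = pvM0 l then 0 else 0) = 0 := by split_ifs <;> rfl
  rw [h0, Nat.zero_add]
  split_ifs with h1 h2 <;> first | rfl | omega

lemma pvItemA_eq_pvItemB (l : List String) : pvItemA l = pvItemB l := by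
  cases l with
  | nil =>
    rw [pvItemB_char]
    rfl
  | cons h t =>
    rw [pvItemB_char]
    have hbD0 : h ∈ PySem.Set.ofList (h :: t) :=
      (PySem.Set.mem_ofList _ _).mpr List.mem_cons_self
    have hne : PySem.Set.ofList (h :: t) ≠ [] := List.ne_nil_of_mem hbD0
    simp only [pvItemA, PySem.Dict.items_counter]
    rw [if_neg (by simp [hne])]
    cases hmx : PySem.List.max?
        (List.map (fun k => (k, (List.count k (h :: t) : Int))) (PySem.Set.ofList (h :: t)))
        (fun p => p.2) with
    | none =>
      exact absurd (List.map_eq_nil_iff.mp ((PySem.List.max?_eq_none_iff _ _).mp hmx)) hne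
    | some bp =>
      obtain ⟨b, hbD, hbp⟩ := List.mem_map.mp (PySem.List.max?_mem hmx)
      subst hbp
      dsimp only
      have hmax : ∀ k ∈ PySem.Set.ofList (h :: t),
          List.count k (h :: t) ≤ List.count b (h :: t) := by
        intro k hk
        have h2 := PySem.List.max?_isMax hmx (k, (List.count k (h :: t) : Int))
          (List.mem_map.mpr ⟨k, hk, rfl⟩)
        simpa using h2
      have hMb : List.count b (h :: t) = pvM0 (h :: t) := by
        apply le_antisymm
        · exact pvM0_ge ((PySem.Set.mem_ofList _ _).mp hbD)
        · exact pvM0_le fun k hk => hmax k ((PySem.Set.mem_ofList _ _).mpr hk)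
      have htied : (List.filter (fun p => p.2 == (List.count b (h :: t) : Int))
          (List.map (fun k => (k, (List.count k (h :: t) : Int))) (PySem.Set.ofList (h :: t)))).length
          = (PySem.List.dedup (h :: t)).countP (fun k => List.count k (h :: t) == pvM0 (h :: t)) := by
        rw [List.filter_map, List.length_map, ← List.countP_eq_length_filter,
          PySem.List.dedup_eq_ofList]
        apply List.countP_congr
        intro k _
        simp only [Function.comp, beq_iff_eq, Nat.cast_inj, hMb]
      have hC1 : 0 < (PySem.List.dedup (h :: t)).countP
          (fun k => List.count k (h :: t) == pvM0 (h :: t)) := by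
        apply List.countP_pos_iff.mpr
        exact ⟨b, by rw [PySem.List.dedup_eq_ofList]; exact hbD, by simp [hMb]⟩
      rw [htied]
      by_cases hone : (PySem.List.dedup (h :: t)).countP
          (fun k => List.count k (h :: t) == pvM0 (h :: t)) = 1
      · rw [if_pos hone, if_neg (by omega)]
        have hex : ∃ a ∈ PySem.List.sorted (h :: t) (fun x => x) false,
            (List.count a (h :: t) == pvM0 (h :: t)) = true := by
          refine ⟨b, ?_, by simp [hMb]⟩
          rw [PySem.List.mem_sorted]
          exact (PySem.Set.mem_ofList _ _).mp hbD
        obtain ⟨a, ha⟩ := Option.isSome_iff_exists.mp (List.find?_isSome.mpr hex)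
        rw [ha]
        have hpa := List.find?_some ha
        have hamem : a ∈ PySem.List.dedup (h :: t) := by
          rw [PySem.List.mem_dedup]
          have := List.mem_of_find?_eq_some ha
          rwa [PySem.List.mem_sorted] at this
        have hab : a = b := pvCountP_eq_one_unique hone hamem
          (by rw [PySem.List.dedup_eq_ofList]; exact hbD) hpa (by simp [hMb])
        rw [hab]
      · rw [if_neg hone, if_pos (by omega)]

lemma pvLabels_eq (hr : List (String × List String)) (idx : Nat) :
    pvLabelsA hr idx = pvLabelsB hr idx := rfl

-- ===== VERDICT (by name: the statement is the Claim_ definition above) =====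
theorem compute_human_majority_spec : Claim_equal_compute_human_majority := by
  intro hr _ _
  show compute_human_majority hr = compute_human_majority_alt hr
  cases hr with
  | nil => rfl
  | cons p rest =>
    simp only [compute_human_majority, compute_human_majority_alt]
    exact List.map_congr_left fun idx _ => by
      rw [pvLabels_eq, pvItemA_eq_pvItemB]
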